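-- pv_equiv track=rewrite | github.com/lastdanger/genshin-wiki-infomation | backend/scripts/manage_character_list.py | generate_config
-- ===== SOURCE A (Python) =====
-- from typing import List
--
-- GENSHIN_CHARACTERS = {
--     "蒙德": {
--         "5星": ["琴", "迪卢克", "莫娜", "温迪", "可莉", "优菈", "阿贝多"],
--         "4星": ["班尼特", "砂糖", "菲谢尔", "芭芭拉", "雷泽", "诺艾尔", "罗莎莉亚", "米卡"],
--     },
--     "璃月": {
--         "5星": ["刻晴", "魈", "甘雨", "胡桃", "钟离", "七七"],
--         "4星": ["香菱", "行秋", "北斗", "凝光", "辛焱", "重云", "烟绯", "云堇", "瑶瑶", "嘉明"],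
--     },
--     "稻妻": {
--         "5星": ["雷电将军", "神里绫华", "宵宫", "珊瑚宫心海", "荒瀧一斗", "八重神子", "神里绫人"],
--         "4星": ["早柚", "九条裟罗", "托马", "五郎", "久岐忍", "鹿野院平藏", "绮良良"],
--     },
--     "须弥": {
--         "5星": ["纳西妲", "提纳里", "赛诺", "妮露", "流浪者", "艾尔海森", "迪希雅"],
--         "4星": ["柯莱", "多莉", "坎蒂丝", "莱依拉", "珐露珊", "卡维", "白术"],
--     },
--     "枫丹": {
--         "5星": ["那维莱特", "芙宁娜", "莱欧斯利", "娜维娅", "克洛琳德", "阿蕾奇诺", "希格雯"],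
--         "4星": ["琳妮特", "菲米尼", "夏沃蕾", "夏洛蒂", "嘉维尔", "艾梅莉埃"],
--     },
--     "纳塔": {
--         "5星": ["玛拉妮", "基尼奇", "希诺宁"],
--         "4星": ["卡齐娜"],
--     },
--     "其他": {
--         "4星": ["旅行者", "安柏", "凯亚", "丽莎"],
--     }
-- }
--
-- def get_all_character_names() -> List[str]:
--     """获取所有角色名"""
--     all_names = []
--     for region in GENSHIN_CHARACTERS.values():
--         for rarity in region.values():
--             all_names.extend(rarity)
--     return all_names
--
-- def generate_config(filter_type: str = "all") -> List[str]:
--     """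
--     生成角色配置
--
--     Args:
--         filter_type: 过滤类型
--             - "all": 所有角色
--             - "5star": 只要5星
--             - "4star": 只要4星
--             - "mondstadt": 蒙德
--             - "liyue": 璃月
--             - "inazuma": 稻妻
--             - "sumeru": 须弥
--             - "fontaine": 枫丹
--             - "natlan": 纳塔
--     """
--     characters = []
--
--     if filter_type == "all":
--         characters = get_all_character_names()
--
--     elif filter_type == "5star":
--         for region_data in GENSHIN_CHARACTERS.values():
--             characters.extend(region_data.get("5星", []))
--
--     elif filter_type == "4star":
--         for region_data in GENSHIN_CHARACTERS.values():
--             characters.extend(region_data.get("4星", []))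
--
--     else:
--         # 按地区
--         region_map = {
--             "mondstadt": "蒙德",
--             "liyue": "璃月",
--             "inazuma": "稻妻",
--             "sumeru": "须弥",
--             "fontaine": "枫丹",
--             "natlan": "纳塔",
--         }
--
--         region_name = region_map.get(filter_type.lower())
--         if region_name and region_name in GENSHIN_CHARACTERS:
--             for chars in GENSHIN_CHARACTERS[region_name].values():
--                 characters.extend(chars)
--
--     return characters
-- ===== SOURCE B (Python) =====
-- from typing import List
--
-- # B: a different data structure — the character table kept as ONE flat list of
-- # (region, rarity, name) records; every query is a single filter over it.
-- ROSTER = [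
--     ("蒙德", "5星", "琴"),
--     ("蒙德", "5星", "迪卢克"),
--     ("蒙德", "5星", "莫娜"),
--     ("蒙德", "5星", "温迪"),
--     ("蒙德", "5星", "可莉"),
--     ("蒙德", "5星", "优菈"),
--     ("蒙德", "5星", "阿贝多"),
--     ("蒙德", "4星", "班尼特"),
--     ("蒙德", "4星", "砂糖"),
--     ("蒙德", "4星", "菲谢尔"),
--     ("蒙德", "4星", "芭芭拉"),
--     ("蒙德", "4星", "雷泽"),
--     ("蒙德", "4星", "诺艾尔"),
--     ("蒙德", "4星", "罗莎莉亚"),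
--     ("蒙德", "4星", "米卡"),
--     ("璃月", "5星", "刻晴"),
--     ("璃月", "5星", "魈"),
--     ("璃月", "5星", "甘雨"),
--     ("璃月", "5星", "胡桃"),
--     ("璃月", "5星", "钟离"),
--     ("璃月", "5星", "七七"),
--     ("璃月", "4星", "香菱"),
--     ("璃月", "4星", "行秋"),
--     ("璃月", "4星", "北斗"),
--     ("璃月", "4星", "凝光"),
--     ("璃月", "4星", "辛焱"),
--     ("璃月", "4星", "重云"),
--     ("璃月", "4星", "烟绯"),
--     ("璃月", "4星", "云堇"),
--     ("璃月", "4星", "瑶瑶"),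
--     ("璃月", "4星", "嘉明"),
--     ("稻妻", "5星", "雷电将军"),
--     ("稻妻", "5星", "神里绫华"),
--     ("稻妻", "5星", "宵宫"),
--     ("稻妻", "5星", "珊瑚宫心海"),
--     ("稻妻", "5星", "荒瀧一斗"),
--     ("稻妻", "5星", "八重神子"),
--     ("稻妻", "5星", "神里绫人"),
--     ("稻妻", "4星", "早柚"),
--     ("稻妻", "4星", "九条裟罗"),
--     ("稻妻", "4星", "托马"),
--     ("稻妻", "4星", "五郎"),
--     ("稻妻", "4星", "久岐忍"),
--     ("稻妻", "4星", "鹿野院平藏"),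
--     ("稻妻", "4星", "绮良良"),
--     ("须弥", "5星", "纳西妲"),
--     ("须弥", "5星", "提纳里"),
--     ("须弥", "5星", "赛诺"),
--     ("须弥", "5星", "妮露"),
--     ("须弥", "5星", "流浪者"),
--     ("须弥", "5星", "艾尔海森"),
--     ("须弥", "5星", "迪希雅"),
--     ("须弥", "4星", "柯莱"),
--     ("须弥", "4星", "多莉"),
--     ("须弥", "4星", "坎蒂丝"),
--     ("须弥", "4星", "莱依拉"),
--     ("须弥", "4星", "珐露珊"),
--     ("须弥", "4星", "卡维"),
--     ("须弥", "4星", "白术"),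
--     ("枫丹", "5星", "那维莱特"),
--     ("枫丹", "5星", "芙宁娜"),
--     ("枫丹", "5星", "莱欧斯利"),
--     ("枫丹", "5星", "娜维娅"),
--     ("枫丹", "5星", "克洛琳德"),
--     ("枫丹", "5星", "阿蕾奇诺"),
--     ("枫丹", "5星", "希格雯"),
--     ("枫丹", "4星", "琳妮特"),
--     ("枫丹", "4星", "菲米尼"),
--     ("枫丹", "4星", "夏沃蕾"),
--     ("枫丹", "4星", "夏洛蒂"),
--     ("枫丹", "4星", "嘉维尔"),
--     ("枫丹", "4星", "艾梅莉埃"),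
--     ("纳塔", "5星", "玛拉妮"),
--     ("纳塔", "5星", "基尼奇"),
--     ("纳塔", "5星", "希诺宁"),
--     ("纳塔", "4星", "卡齐娜"),
--     ("其他", "4星", "旅行者"),
--     ("其他", "4星", "安柏"),
--     ("其他", "4星", "凯亚"),
--     ("其他", "4星", "丽莎"),
-- ]
--
-- REGION_MAP = {
--     "mondstadt": "蒙德",
--     "liyue": "璃月",
--     "inazuma": "稻妻",
--     "sumeru": "须弥",
--     "fontaine": "枫丹",
--     "natlan": "纳塔",
-- }
--
-- def generate_config(filter_type: str = "all") -> List[str]: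
--     # Translate filter_type into an optional region / optional rarity constraint,
--     # then answer with one comprehension over the flat ROSTER.
--     if filter_type == "all":
--         want_region, want_rarity = None, None
--     elif filter_type == "5star":
--         want_region, want_rarity = None, "5星"
--     elif filter_type == "4star":
--         want_region, want_rarity = None, "4星"
--     else:
--         want_region = REGION_MAP.get(filter_type.lower())
--         if want_region is None:
--             return []
--         want_rarity = None
--     return [
--         name
--         for region, rarity, name in ROSTER
--         if (want_region is None or region == want_region)
--         and (want_rarity is None or rarity == want_rarity)
--     ]
-- ===== Notes on version B (the rewrite author's own statement) =====
-- stated objective: alternative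
-- what changed: B flattens the nested region->rarity dict once into a flat (region, rarity, name) roster and answers every query as a single filter with optional region/rarity constraints, replacing A's four branch-specific nested-dict loops.
import Mathlib
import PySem

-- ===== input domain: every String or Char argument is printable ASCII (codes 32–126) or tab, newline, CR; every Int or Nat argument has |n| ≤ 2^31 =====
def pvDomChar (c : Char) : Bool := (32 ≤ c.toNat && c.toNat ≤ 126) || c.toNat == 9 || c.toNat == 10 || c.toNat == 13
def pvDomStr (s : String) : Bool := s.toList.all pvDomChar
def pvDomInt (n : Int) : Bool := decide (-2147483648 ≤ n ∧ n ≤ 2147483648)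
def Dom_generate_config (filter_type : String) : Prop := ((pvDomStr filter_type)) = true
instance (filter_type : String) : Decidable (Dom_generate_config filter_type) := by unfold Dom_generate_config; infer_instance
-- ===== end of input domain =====

-- B's change: the character table is kept as ONE flat list of (region, rarity, name)
-- records and every query is a single filter over it (objective: alternative).

-- ===== PORT A =====
-- the nested module-level dict A iterates
def genshinCharacters : PySem.Dict String (PySem.Dict String (List String)) :=
  PySem.Dict.mk [
    ("蒙德", PySem.Dict.mk [
      ("5星", ["琴", "迪卢克", "莫娜", "温迪", "可莉", "优菈", "阿贝多"]),
      ("4星", ["班尼特", "砂糖", "菲谢尔", "芭芭拉", "雷泽", "诺艾尔", "罗莎莉亚", "米卡"])]),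
    ("璃月", PySem.Dict.mk [
      ("5星", ["刻晴", "魈", "甘雨", "胡桃", "钟离", "七七"]),
      ("4星", ["香菱", "行秋", "北斗", "凝光", "辛焱", "重云", "烟绯", "云堇", "瑶瑶", "嘉明"])]),
    ("稻妻", PySem.Dict.mk [
      ("5星", ["雷电将军", "神里绫华", "宵宫", "珊瑚宫心海", "荒瀧一斗", "八重神子", "神里绫人"]),
      ("4星", ["早柚", "九条裟罗", "托马", "五郎", "久岐忍", "鹿野院平藏", "绮良良"])]),
    ("须弥", PySem.Dict.mk [
      ("5星", ["纳西妲", "提纳里", "赛诺", "妮露", "流浪者", "艾尔海森", "迪希雅"]),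
      ("4星", ["柯莱", "多莉", "坎蒂丝", "莱依拉", "珐露珊", "卡维", "白术"])]),
    ("枫丹", PySem.Dict.mk [
      ("5星", ["那维莱特", "芙宁娜", "莱欧斯利", "娜维娅", "克洛琳德", "阿蕾奇诺", "希格雯"]),
      ("4星", ["琳妮特", "菲米尼", "夏沃蕾", "夏洛蒂", "嘉维尔", "艾梅莉埃"])]),
    ("纳塔", PySem.Dict.mk [
      ("5星", ["玛拉妮", "基尼奇", "希诺宁"]),
      ("4星", ["卡齐娜"])]),
    ("其他", PySem.Dict.mk [
      ("4星", ["旅行者", "安柏", "凯亚", "丽莎"])])]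

-- the region_map literal A builds inside its else-branch
def aRegionMap : PySem.Dict String String :=
  PySem.Dict.mk [
    ("mondstadt", "蒙德"), ("liyue", "璃月"), ("inazuma", "稻妻"),
    ("sumeru", "须弥"), ("fontaine", "枫丹"), ("natlan", "纳塔")]

def get_all_character_names : List String :=
  genshinCharacters.values.foldl
    (fun all_names region => region.values.foldl (fun acc rarity => acc ++ rarity) all_names) []

def generate_config (filter_type : String) : List String :=
  if filter_type = "all" then
    get_all_character_names
  else if filter_type = "5star" then
    genshinCharacters.values.foldl (fun cs rd => cs ++ rd.getD "5星" []) []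
  else if filter_type = "4star" then
    genshinCharacters.values.foldl (fun cs rd => cs ++ rd.getD "4星" []) []
  else
    match PySem.Dict.get? aRegionMap (PySem.Str.lower filter_type) with
    | some region_name =>
        -- 'if region_name and region_name in GENSHIN_CHARACTERS'
        if region_name ≠ "" ∧ genshinCharacters.contains region_name then
          (genshinCharacters.getD region_name PySem.Dict.empty).values.foldl
            (fun cs chars => cs ++ chars) []
        else []
    | none => []

-- ===== PORT B =====
-- B's flat module-level ROSTER of (region, rarity, name) records
def roster : List (String × String × String) := [
    ("蒙德", "5星", "琴"),
    ("蒙德", "5星", "迪卢克"),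
    ("蒙德", "5星", "莫娜"),
    ("蒙德", "5星", "温迪"),
    ("蒙德", "5星", "可莉"),
    ("蒙德", "5星", "优菈"),
    ("蒙德", "5星", "阿贝多"),
    ("蒙德", "4星", "班尼特"),
    ("蒙德", "4星", "砂糖"),
    ("蒙德", "4星", "菲谢尔"),
    ("蒙德", "4星", "芭芭拉"),
    ("蒙德", "4星", "雷泽"),
    ("蒙德", "4星", "诺艾尔"),
    ("蒙德", "4星", "罗莎莉亚"),
    ("蒙德", "4星", "米卡"),
    ("璃月", "5星", "刻晴"),
    ("璃月", "5星", "魈"),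
    ("璃月", "5星", "甘雨"),
    ("璃月", "5星", "胡桃"),
    ("璃月", "5星", "钟离"),
    ("璃月", "5星", "七七"),
    ("璃月", "4星", "香菱"),
    ("璃月", "4星", "行秋"),
    ("璃月", "4星", "北斗"),
    ("璃月", "4星", "凝光"),
    ("璃月", "4星", "辛焱"),
    ("璃月", "4星", "重云"),
    ("璃月", "4星", "烟绯"),
    ("璃月", "4星", "云堇"),
    ("璃月", "4星", "瑶瑶"),
    ("璃月", "4星", "嘉明"),
    ("稻妻", "5星", "雷电将军"),
    ("稻妻", "5星", "神里绫华"),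
    ("稻妻", "5星", "宵宫"),
    ("稻妻", "5星", "珊瑚宫心海"),
    ("稻妻", "5星", "荒瀧一斗"),
    ("稻妻", "5星", "八重神子"),
    ("稻妻", "5星", "神里绫人"),
    ("稻妻", "4星", "早柚"),
    ("稻妻", "4星", "九条裟罗"),
    ("稻妻", "4星", "托马"),
    ("稻妻", "4星", "五郎"),
    ("稻妻", "4星", "久岐忍"),
    ("稻妻", "4星", "鹿野院平藏"),
    ("稻妻", "4星", "绮良良"),
    ("须弥", "5星", "纳西妲"),
    ("须弥", "5星", "提纳里"),
    ("须弥", "5星", "赛诺"),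
    ("须弥", "5星", "妮露"),
    ("须弥", "5星", "流浪者"),
    ("须弥", "5星", "艾尔海森"),
    ("须弥", "5星", "迪希雅"),
    ("须弥", "4星", "柯莱"),
    ("须弥", "4星", "多莉"),
    ("须弥", "4星", "坎蒂丝"),
    ("须弥", "4星", "莱依拉"),
    ("须弥", "4星", "珐露珊"),
    ("须弥", "4星", "卡维"),
    ("须弥", "4星", "白术"),
    ("枫丹", "5星", "那维莱特"),
    ("枫丹", "5星", "芙宁娜"),
    ("枫丹", "5星", "莱欧斯利"),
    ("枫丹", "5星", "娜维娅"),
    ("枫丹", "5星", "克洛琳德"),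
    ("枫丹", "5星", "阿蕾奇诺"),
    ("枫丹", "5星", "希格雯"),
    ("枫丹", "4星", "琳妮特"),
    ("枫丹", "4星", "菲米尼"),
    ("枫丹", "4星", "夏沃蕾"),
    ("枫丹", "4星", "夏洛蒂"),
    ("枫丹", "4星", "嘉维尔"),
    ("枫丹", "4星", "艾梅莉埃"),
    ("纳塔", "5星", "玛拉妮"),
    ("纳塔", "5星", "基尼奇"),
    ("纳塔", "5星", "希诺宁"),
    ("纳塔", "4星", "卡齐娜"),
    ("其他", "4星", "旅行者"),
    ("其他", "4星", "安柏"),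
    ("其他", "4星", "凯亚"),
    ("其他", "4星", "丽莎")]

def bRegionMap : PySem.Dict String String :=
  PySem.Dict.mk [
    ("mondstadt", "蒙德"), ("liyue", "璃月"), ("inazuma", "稻妻"),
    ("sumeru", "须弥"), ("fontaine", "枫丹"), ("natlan", "纳塔")]

def generate_config_alt (filter_type : String) : List String :=
  -- want : (optional region, optional rarity), or none for Python's early 'return []'
  let want : Option (Option String × Option String) :=
    if filter_type = "all" then some (none, none)
    else if filter_type = "5star" then some (none, some "5星")
    else if filter_type = "4star" then some (none, some "4星")
    else
      match PySem.Dict.get? bRegionMap (PySem.Str.lower filter_type) with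
      | none => none
      | some r => some (some r, none)
  match want with
  | none => []
  | some (wr, wk) =>
      (roster.filter (fun t =>
        (wr.elim true (fun r => t.1 == r)) && (wk.elim true (fun k => t.2.1 == k)))).map
        (fun t => t.2.2)

-- ===== PRECONDITION & SPEC =====
def Spec_generate_config (filter_type : String) (out : List String) : Prop := out = generate_config_alt filter_type
instance (filter_type : String) (out : List String) : Decidable (Spec_generate_config filter_type out) := by unfold Spec_generate_config; infer_instance

-- ===== CLAIM (what is proved, stated in full; the proofs are below) =====
def Claim_equal_generate_config : Prop := ∀ (filter_type : String), Dom_generate_config filter_type → Spec_generate_config filter_type (generate_config filter_type)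

-- ===== LEMMAS AND PROOFS =====

-- the region_map lookup can only produce one of seven values, and both ports'
-- region_map literals agree on it
lemma regionMap_get_cases (t : String) :
    (PySem.Dict.get? aRegionMap t = none ∨ PySem.Dict.get? aRegionMap t = some "蒙德" ∨
     PySem.Dict.get? aRegionMap t = some "璃月" ∨ PySem.Dict.get? aRegionMap t = some "稻妻" ∨
     PySem.Dict.get? aRegionMap t = some "须弥" ∨ PySem.Dict.get? aRegionMap t = some "枫丹" ∨
     PySem.Dict.get? aRegionMap t = some "纳塔") ∧
    PySem.Dict.get? bRegionMap t = PySem.Dict.get? aRegionMap t := by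
  unfold aRegionMap bRegionMap
  simp only [PySem.Dict.get?_mk_cons]
  split_ifs <;> simp [PySem.Dict.get?]

-- ===== VERDICT (by name: the statement is the Claim_ definition above) =====
theorem generate_config_spec : Claim_equal_generate_config := by
  intro ft _
  unfold Spec_generate_config
  by_cases h1 : ft = "all"
  · subst h1; decide
  · by_cases h2 : ft = "5star"
    · subst h2; decide
    · by_cases h3 : ft = "4star"
      · subst h3; decide
      · obtain ⟨hc, hb⟩ := regionMap_get_cases (PySem.Str.lower ft)
        rcases hc with hg | hg | hg | hg | hg | hg | hg <;>
          simp only [generate_config, generate_config_alt, if_neg h1, if_neg h2, if_neg h3,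
            hg, hb] <;> decide
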